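-- pv_equiv track=rewrite | github.com/Ggoon23/Python | CT_Programmers/LV_0/등수 매기기.py | solution
-- ===== SOURCE A (Python) =====
-- def solution(score):
--     st=[]
--     answer = []
--     for i in range(len(score)) :
--         st.append(score[i][0]+score[i][1])
--     for i in st:
--         a=1
--         for j in st:
--             if i<j:
--                 a +=1
--         answer.append(a)
--     return answer
-- ===== SOURCE B (Python) =====
-- def solution(score):
--     sums = [s[0] + s[1] for s in score]
--     desc = sorted(sums, reverse=True)
--     rank = {}
--     for i, v in enumerate(desc):
--         if v not in rank:
--             rank[v] = i + 1
--     return [rank[v] for v in sums]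
-- ===== Notes on version B (the rewrite author's own statement) =====
-- stated objective: faster
-- what changed: Replaces the quadratic count-of-greater inner scan by sorting the sums descending once and building a first-occurrence-index rank dictionary in one pass, then mapping each sum through the dictionary.
import Mathlib
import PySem

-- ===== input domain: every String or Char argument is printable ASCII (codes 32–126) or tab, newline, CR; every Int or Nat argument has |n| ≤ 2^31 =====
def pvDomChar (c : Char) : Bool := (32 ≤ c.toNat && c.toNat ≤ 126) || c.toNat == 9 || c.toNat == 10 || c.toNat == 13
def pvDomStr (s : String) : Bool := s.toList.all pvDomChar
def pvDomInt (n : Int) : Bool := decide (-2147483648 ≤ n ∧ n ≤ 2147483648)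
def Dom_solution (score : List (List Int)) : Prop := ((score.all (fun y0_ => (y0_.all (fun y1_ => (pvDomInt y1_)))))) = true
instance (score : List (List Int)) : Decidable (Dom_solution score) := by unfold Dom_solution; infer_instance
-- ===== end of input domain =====

-- B replaces A's quadratic count-of-greater inner scan by one descending sort plus a
-- first-occurrence rank dictionary built in a single pass (faster).

-- ===== PORT A =====
def solution (score : List (List Int)) : List Int :=
  let st := (PySem.List.pyRange 0 (score.length : Int) 1).foldl
    (fun acc i => acc ++ [PySem.List.pyGetD (PySem.List.pyGetD score i []) 0 0
                        + PySem.List.pyGetD (PySem.List.pyGetD score i []) 1 0]) []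
  st.foldl (fun answer i =>
    answer ++ [st.foldl (fun a j => if i < j then a + 1 else a) 1]) []

-- ===== PORT B =====
def solution_alt (score : List (List Int)) : List Int :=
  let sums := score.map (fun s => PySem.List.pyGetD s 0 0 + PySem.List.pyGetD s 1 0)
  let desc := PySem.List.sorted sums (fun x => x) true
  let rank := (PySem.List.enumerate desc 0).foldl
    (fun d p => if d.contains p.2 then d else d.insert p.2 (p.1 + 1)) PySem.Dict.empty
  sums.map (fun v => ((rank.get? v).getD 0))

-- ===== PRECONDITION & SPEC =====
-- Pre_ excludes inputs with a row of fewer than two entries: there Python A raises IndexError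
-- on score[i][0]/score[i][1] (and B raises the same way on s[0]/s[1]).
def Pre_solution (score : List (List Int)) : Prop := ∀ row ∈ score, 2 ≤ row.length
instance (score : List (List Int)) : Decidable (Pre_solution score) := by unfold Pre_solution; infer_instance
def pvWitness_solution : List (List Int) := [[1, 2], [3, 4], [3, 0]]

def Spec_solution (score : List (List Int)) (out : List Int) : Prop := out = solution_alt score
instance (score : List (List Int)) (out : List Int) : Decidable (Spec_solution score out) := by unfold Spec_solution; infer_instance

-- ===== CLAIM (what is proved, stated in full; the proofs are below) =====
def Claim_equal_solution : Prop := ∀ (score : List (List Int)), Dom_solution score → Pre_solution score → Spec_solution score (solution score)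

-- ===== LEMMAS AND PROOFS =====

-- Once a key is present it is never overwritten by the rank-building fold.
theorem rank_fold_stable (l : List Int) (s : Int) (d : PySem.Dict Int Int) (v : Int)
    (hd : d.contains v = true) :
    ((PySem.List.enumerate l s).foldl
      (fun d p => if d.contains p.2 then d else d.insert p.2 (p.1 + 1)) d).get? v = d.get? v := by
  induction l generalizing s d with
  | nil => simp [PySem.List.enumerate_nil]
  | cons x t ih =>
    rw [PySem.List.enumerate_cons]
    simp only [List.foldl_cons]
    by_cases hx : d.contains x = true
    · simp [hx, ih _ _ hd]
    · have hvx : v ≠ x := by rintro rfl; simp [hx] at hd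
      simp only [hx, Bool.false_eq_true, if_false]
      rw [ih]
      · exact PySem.Dict.get?_insert_of_ne d _ hvx
      · rw [PySem.Dict.contains_insert]; simp [hd]

-- The rank-building fold: for v in a descending-sorted list l not yet in d, the resulting
-- dict maps v to s + (number of elements of l strictly above v) + 1 (its first index + 1).
theorem rank_fold_get (l : List Int) (s : Int) (d : PySem.Dict Int Int) (v : Int)
    (hsort : l.Pairwise (fun a b => b ≤ a)) (hv : v ∈ l) (hd : d.contains v = false) :
    ((PySem.List.enumerate l s).foldl
      (fun d p => if d.contains p.2 then d else d.insert p.2 (p.1 + 1)) d).get? v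
    = some (s + (l.countP (fun x => decide (v < x)) : Int) + 1) := by
  induction l generalizing s d with
  | nil => simp at hv
  | cons x t ih =>
    rw [PySem.List.enumerate_cons]
    simp only [List.foldl_cons]
    rcases List.pairwise_cons.mp hsort with ⟨hxt, ht⟩
    by_cases hvx : v = x
    · subst hvx
      have hcount : (v :: t).countP (fun y => decide (v < y)) = 0 := by
        rw [List.countP_eq_zero]
        intro a ha
        rcases List.mem_cons.mp ha with rfl | hat
        · simp
        · simp only [decide_eq_true_eq]; exact not_lt.mpr (hxt a hat)
      simp only [hd, Bool.false_eq_true, if_false]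
      rw [rank_fold_stable, PySem.Dict.get?_insert_self, hcount]
      · norm_num
      · exact PySem.Dict.contains_insert_self d v _
    · have hvt : v ∈ t := (List.mem_cons.mp hv).resolve_left hvx
      have hlt : v < x := lt_of_le_of_ne (hxt v hvt) hvx
      have hcount : (x :: t).countP (fun y => decide (v < y))
          = t.countP (fun y => decide (v < y)) + 1 := by
        rw [List.countP_cons]; simp [hlt]
      rw [hcount]
      by_cases hx : d.contains x = true
      · simp only [hx, if_true]
        rw [ih _ _ ht hvt hd]
        push_cast; ring_nf
      · simp only [hx, Bool.false_eq_true, if_false]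
        rw [ih _ _ ht hvt (by rw [PySem.Dict.contains_insert]; simp [hd, hvx])]
        push_cast; ring_nf

-- ===== VERDICT (by name: the statement is the Claim_ definition above) =====
theorem solution_spec : Claim_equal_solution := by
  intro score _ _
  unfold Spec_solution solution solution_alt
  simp only []
  have hst : (PySem.List.pyRange 0 (score.length : Int) 1).foldl
      (fun acc i => acc ++ [PySem.List.pyGetD (PySem.List.pyGetD score i []) 0 0
                          + PySem.List.pyGetD (PySem.List.pyGetD score i []) 1 0]) []
      = score.map (fun s => PySem.List.pyGetD s 0 0 + PySem.List.pyGetD s 1 0) := by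
    rw [PySem.List.foldl_append_singleton_eq_map]
    rw [show (fun i => PySem.List.pyGetD (PySem.List.pyGetD score i []) 0 0
                          + PySem.List.pyGetD (PySem.List.pyGetD score i []) 1 0)
        = (fun s => PySem.List.pyGetD s 0 0 + PySem.List.pyGetD s 1 0) ∘
            (fun i => PySem.List.pyGetD score i []) from rfl]
    rw [← List.map_map, PySem.List.map_pyGetD_pyRange_zero']
    simp
  rw [hst, PySem.List.foldl_append_singleton_eq_map, List.nil_append]
  apply List.map_congr_left
  intro v hv
  set sums := score.map (fun s => PySem.List.pyGetD s 0 0 + PySem.List.pyGetD s 1 0) with hsums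
  set desc := PySem.List.sorted sums (fun x => x) true with hdesc
  have hsort : desc.Pairwise (fun a b => b ≤ a) := PySem.List.sorted_pairwise_rev sums (fun x => x)
  have hperm : desc.Perm sums := PySem.List.sorted_perm sums (fun x => x) true
  have hvd : v ∈ desc := (PySem.List.mem_sorted sums (fun x => x) true v).mpr hv
  rw [rank_fold_get desc 0 PySem.Dict.empty v hsort hvd (PySem.Dict.contains_empty v)]
  rw [PySem.List.foldl_ite_add_one]
  rw [hperm.countP_eq]
  simp only [Option.getD_some]
  ring
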